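-- pv_equiv track=rewrite | github.com/Arissj4/Empirical-analysis-of-defect-in-R-Markdown | scripts/summarize_repo.py | infer_rmd_touch
-- ===== SOURCE A (Python) =====
-- def infer_rmd_touch(row, col_files):
--     """If touches_rmd is missing, infer it from filenames."""
--     if col_files is None:
--         return False
--     val = str(row[col_files] or "")
--     toks = [t.strip().lower() for t in val.split(";") if t.strip()]
--     if not toks:
--         return False
--     RMD_HINTS = (".rmd", ".qmd", "_site.yml", "_output.yml", "bookdown.yml")
--     return any(any(tok.endswith(h) or h in tok for h in RMD_HINTS) for tok in toks)
-- ===== SOURCE B (Python) =====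
-- def infer_rmd_touch(row, col_files):
--     """If touches_rmd is missing, infer it from filenames."""
--     if col_files is None:
--         return False
--     s = str(row[col_files] or "").lower()
--     return any(h in s for h in (".rmd", ".qmd", "_site.yml", "_output.yml", "bookdown.yml"))
-- ===== Notes on version B (the rewrite author's own statement) =====
-- stated objective: simpler
-- what changed: B drops the semicolon tokenization, per-token strip/lower, the empty-token filter and the redundant endswith test, and instead tests each hint once for substring containment in the whole lowercased string (hints contain no ';' or whitespace, so token-wise containment equals whole-string containment).
import Mathlib
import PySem

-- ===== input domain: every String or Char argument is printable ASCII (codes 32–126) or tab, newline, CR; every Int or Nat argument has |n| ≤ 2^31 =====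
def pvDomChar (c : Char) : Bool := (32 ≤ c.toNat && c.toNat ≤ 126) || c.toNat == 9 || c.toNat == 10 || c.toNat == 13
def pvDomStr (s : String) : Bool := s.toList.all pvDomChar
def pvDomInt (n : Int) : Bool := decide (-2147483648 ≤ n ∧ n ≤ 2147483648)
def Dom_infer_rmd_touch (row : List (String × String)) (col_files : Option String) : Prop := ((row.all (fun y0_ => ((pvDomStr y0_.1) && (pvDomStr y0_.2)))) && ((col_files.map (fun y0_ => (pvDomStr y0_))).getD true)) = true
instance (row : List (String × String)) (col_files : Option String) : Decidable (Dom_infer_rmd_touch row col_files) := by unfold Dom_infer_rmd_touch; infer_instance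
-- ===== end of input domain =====

-- B replaces A's semicolon tokenization (split/strip/filter + per-token endswith-or-substring test)
-- by one substring test per hint against the whole lowercased string; objective: simpler.
-- Pre_ excludes only the inputs where Python A raises KeyError (col_files names a missing key).


-- the RMD_HINTS tuple, shared by both ports
def rmdHints : List String := [".rmd", ".qmd", "_site.yml", "_output.yml", "bookdown.yml"]

-- ===== PORT A =====
def infer_rmd_touch (row : List (String × String)) (col_files : Option String) : Bool :=
  match col_files with
  | none => false
  | some k =>
    match PySem.Dict.get? (PySem.Dict.mk row) k with
    | none => false  -- Python raises KeyError here; excluded by Pre_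
    | some raw =>
      let val : String := if raw == "" then "" else raw  -- str(row[col_files] or "")
      -- val.split(";"): the separator is the nonempty literal ";", so split? is always `some`
      let pieces : List String := (PySem.Str.split? val ";").getD []
      let toks : List String :=
        (pieces.filter (fun t => PySem.Str.strip t != "")).map
          (fun t => PySem.Str.lower (PySem.Str.strip t))
      if toks.isEmpty then false
      else toks.any (fun tok =>
        rmdHints.any (fun h => PySem.Str.endswith tok h || PySem.Str.isIn h tok))

-- ===== PORT B =====
def infer_rmd_touch_alt (row : List (String × String)) (col_files : Option String) : Bool :=
  match col_files with
  | none => false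
  | some k =>
    match PySem.Dict.get? (PySem.Dict.mk row) k with
    | none => false  -- Python raises KeyError here; excluded by Pre_
    | some raw =>
      let s : String := PySem.Str.lower (if raw == "" then "" else raw)
      rmdHints.any (fun h => PySem.Str.isIn h s)

-- ===== PRECONDITION & SPEC =====
-- Pre_ excludes exactly the inputs where A raises KeyError: col_files = some k with k not a key of row
def Pre_infer_rmd_touch (row : List (String × String)) (col_files : Option String) : Prop :=
  (col_files.all (fun k => PySem.Dict.contains (PySem.Dict.mk row) k)) = true
instance (row : List (String × String)) (col_files : Option String) : Decidable (Pre_infer_rmd_touch row col_files) := by unfold Pre_infer_rmd_touch; infer_instance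
def pvWitness_infer_rmd_touch : (List (String × String)) × Option String :=
  ([("files", "analysis.Rmd; data.csv")], some "files")

def Spec_infer_rmd_touch (row : List (String × String)) (col_files : Option String) (out : Bool) : Prop := out = infer_rmd_touch_alt row col_files
instance (row : List (String × String)) (col_files : Option String) (out : Bool) : Decidable (Spec_infer_rmd_touch row col_files out) := by unfold Spec_infer_rmd_touch; infer_instance

-- ===== CLAIM (what is proved, stated in full; the proofs are below) =====
def Claim_equal_infer_rmd_touch : Prop := ∀ (row : List (String × String)) (col_files : Option String), Dom_infer_rmd_touch row col_files → Pre_infer_rmd_touch row col_files → Spec_infer_rmd_touch row col_files (infer_rmd_touch row col_files)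

-- ===== LEMMAS AND PROOFS =====

-- `lowerChar` only moves 'A'..'Z' (PySem.Chars.isupper is ASCII), so it neither creates nor
-- destroys whitespace or semicolons.
lemma upper_bounds {c : Char} (h : PySem.Chars.isupper c = true) : 65 ≤ c.toNat ∧ c.toNat ≤ 90 := by
  simp [PySem.Chars.isupper, Char.le_def] at h
  exact h

lemma isspace_lowerChar (c : Char) :
    PySem.Chars.isspace (PySem.Chars.lowerChar c) = PySem.Chars.isspace c := by
  unfold PySem.Chars.lowerChar
  split_ifs with h
  · obtain ⟨h1, h2⟩ := upper_bounds h
    have hv : (Char.ofNat (c.toNat + 32)).toNat = c.toNat + 32 := by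
      rw [Char.toNat_ofNat]; rw [if_pos]; unfold Nat.isValidChar; left; omega
    simp only [PySem.Chars.isspace, hv]
    rw [Bool.eq_iff_iff]
    simp only [Bool.or_eq_true, Bool.and_eq_true, decide_eq_true_eq]
    omega
  · rfl

lemma char_eq_iff_toNat (a b : Char) : a = b ↔ a.toNat = b.toNat := by
  constructor
  · intro h; rw [h]
  · intro h; exact Char.ext (by exact UInt32.toNat_inj.mp h)

lemma lowerChar_beq_semi (c : Char) : (PySem.Chars.lowerChar c == ';') = (c == ';') := by
  unfold PySem.Chars.lowerChar
  split_ifs with h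
  · obtain ⟨h1, h2⟩ := upper_bounds h
    have hv : (Char.ofNat (c.toNat + 32)).toNat = c.toNat + 32 := by
      rw [Char.toNat_ofNat]; rw [if_pos]; unfold Nat.isValidChar; left; omega
    have hsemi : (';' : Char).toNat = 59 := by decide
    have l : (Char.ofNat (c.toNat + 32) == ';') = false := by
      simp only [beq_eq_false_iff_ne, ne_eq, char_eq_iff_toNat, hv, hsemi]
      omega
    have r : (c == ';') = false := by
      simp only [beq_eq_false_iff_ne, ne_eq, char_eq_iff_toNat, hsemi]
      omega
    rw [l, r]
  · rfl

-- PySem's fuel-based splitOn with a one-character separator is Mathlib's List.splitOn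
lemma go_eq (c : Char) (fuel : Nat) : ∀ (l cur : List Char) (acc : List (List Char)), l.length < fuel →
    PySem.Chars.splitOn.go [c] fuel l cur acc
      = acc.reverse ++ (cur.reverse ++ (List.splitOn c l).headI) :: (List.splitOn c l).tail := by
  induction fuel with
  | zero => intro l cur acc h; omega
  | succ fuel ih =>
    intro l cur acc h
    cases l with
    | nil => simp [PySem.Chars.splitOn.go, List.splitOn]
    | cons a rest =>
      obtain ⟨q, qs, hq⟩ : ∃ q qs, List.splitOn c rest = q :: qs := by
        rcases e : List.splitOn c rest with _ | ⟨q, qs⟩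
        · exact absurd e (List.splitOnP_ne_nil _ _)
        · exact ⟨q, qs, rfl⟩
      by_cases hac : (a == c) = true
      · have hca : c = a := (beq_iff_eq.mp hac).symm
        subst hca
        rw [show PySem.Chars.splitOn.go [c] (fuel+1) (c :: rest) cur acc
            = PySem.Chars.splitOn.go [c] fuel rest [] (cur.reverse :: acc) by
              simp [PySem.Chars.splitOn.go, List.isPrefixOf]]
        rw [ih _ _ _ (by simpa using h)]
        rw [show List.splitOn c (c :: rest) = [] :: List.splitOn c rest by
              simp [List.splitOn, List.splitOnP_cons]]
        rw [hq]; simp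
      · rw [show PySem.Chars.splitOn.go [c] (fuel+1) (a :: rest) cur acc
            = PySem.Chars.splitOn.go [c] fuel rest (a :: cur) acc by
              simp [PySem.Chars.splitOn.go, List.isPrefixOf]
              intro hh; exact absurd (by simp [hh]) hac]
        rw [ih _ _ _ (by simpa using h)]
        rw [show List.splitOn c (a :: rest) = (List.splitOn c rest).modifyHead (a :: ·) by
              simp [List.splitOn, List.splitOnP_cons, hac]]
        rw [hq]; simp

lemma chars_splitOn_eq (c : Char) (l : List Char) :
    PySem.Chars.splitOn l [c] = List.splitOn c l := by
  obtain ⟨q, qs, hq⟩ : ∃ q qs, List.splitOn c l = q :: qs := by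
    rcases e : List.splitOn c l with _ | ⟨q, qs⟩
    · exact absurd e (List.splitOnP_ne_nil _ _)
    · exact ⟨q, qs, rfl⟩
  unfold PySem.Chars.splitOn
  rw [go_eq c (l.length+1) l [] [] (by omega), hq]
  simp

-- splitting commutes with lowercasing
lemma splitOn_map_lower (l : List Char) :
    List.splitOn ';' (l.map PySem.Chars.lowerChar)
      = (List.splitOn ';' l).map (List.map PySem.Chars.lowerChar) := by
  induction l with
  | nil => simp [List.splitOn]
  | cons a t ih =>
    simp only [List.map_cons, List.splitOn, List.splitOnP_cons] at *
    rw [lowerChar_beq_semi a]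
    by_cases h : (a == ';') = true
    · rw [if_pos h, if_pos h]; simp [ih]
    · rw [if_neg h, if_neg h, ih]
      cases e : List.splitOnP (fun x => x == ';') t <;> simp

lemma noSemi_of_mem_splitOn {p : List Char} {l : List Char} (h : p ∈ List.splitOn ';' l) : ';' ∉ p := by
  induction l generalizing p with
  | nil => simp [List.splitOn] at h; simp [h]
  | cons a t ih =>
    simp only [List.splitOn, List.splitOnP_cons] at h
    by_cases hac : (a == ';') = true
    · rw [if_pos hac] at h
      rcases List.mem_cons.mp h with h | h
      · simp [h]
      · exact ih h
    · rw [if_neg hac] at h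
      obtain ⟨q, qs, hq⟩ : ∃ q qs, List.splitOnP (fun x => x == ';') t = q :: qs := by
        rcases e : List.splitOnP (fun x => x == ';') t with _ | ⟨q, qs⟩
        · exact absurd e (List.splitOnP_ne_nil _ _)
        · exact ⟨q, qs, rfl⟩
      rw [hq] at h
      simp only [List.modifyHead] at h
      rcases List.mem_cons.mp h with h | h
      · subst h
        intro hm
        rcases List.mem_cons.mp hm with h' | h'
        · exact absurd (by simp [h'.symm]) hac
        · exact (ih (p := q) (by rw [List.splitOn, hq]; exact List.mem_cons_self)) h'
      · exact ih (by rw [List.splitOn, hq]; exact List.mem_cons_of_mem _ h)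

-- a needle that avoids the separator sits inside one of the two sides
lemma prefix_avoid {h p t : List Char} (hh : ';' ∉ h) (hp : ';' ∉ p)
    (hpre : h <+: p ++ ';' :: t) : h <+: p := by
  induction h generalizing p with
  | nil => exact List.nil_prefix
  | cons x h' ih =>
    cases p with
    | nil =>
      obtain ⟨r, hr⟩ := hpre
      simp at hr
      exact absurd (List.mem_cons.mpr (Or.inl hr.1.symm)) hh
    | cons b p' =>
      rw [List.cons_append, List.cons_prefix_cons] at hpre
      obtain ⟨hxb, hrest⟩ := hpre
      rw [List.cons_prefix_cons]
      refine ⟨hxb, ih (by simp_all) (by simp_all) hrest⟩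

lemma infix_sep_iff {h : List Char} (t : List Char) (hne : h ≠ []) (hh : ';' ∉ h) :
    ∀ p : List Char, ';' ∉ p → (h <:+: p ++ ';' :: t ↔ h <:+: p ∨ h <:+: t) := by
  intro p hp
  induction p with
  | nil =>
    simp only [List.nil_append, List.infix_cons_iff]
    constructor
    · rintro (hpre | hinf)
      · cases h with
        | nil => exact absurd rfl hne
        | cons x h' =>
          rw [List.cons_prefix_cons] at hpre
          exact absurd (by simp [hpre.1]) hh
      · exact Or.inr hinf
    · rintro (hnil | hinf)
      · rw [List.infix_nil] at hnil; exact absurd hnil hne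
      · exact Or.inr hinf
  | cons b p' ih =>
    have hp' : ';' ∉ p' := by simp_all
    rw [List.cons_append, List.infix_cons_iff, List.infix_cons_iff, ih hp']
    constructor
    · rintro (hpre | hinf | hinf)
      · exact Or.inl (Or.inl (prefix_avoid hh (by simp_all) hpre))
      · exact Or.inl (Or.inr hinf)
      · exact Or.inr hinf
    · rintro ((hpre | hinf) | hinf)
      · exact Or.inl (hpre.trans (List.prefix_append _ _))
      · exact Or.inr (Or.inl hinf)
      · exact Or.inr (Or.inr hinf)

lemma intercalate_infix_iff {h : List Char} (hne : h ≠ []) (hh : ';' ∉ h) :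
    ∀ ps : List (List Char), (∀ p ∈ ps, ';' ∉ p) →
      (h <:+: [';'].intercalate ps ↔ ∃ p ∈ ps, h <:+: p) := by
  intro ps
  induction ps with
  | nil => simp [List.intercalate, List.infix_nil, hne]
  | cons q qs ih =>
    intro hall
    cases qs with
    | nil => simp [List.intercalate]
    | cons q' qs' =>
      have hstep : [';'].intercalate (q :: q' :: qs') = q ++ ';' :: [';'].intercalate (q' :: qs') := by
        simp [List.intercalate, List.intersperse]
      rw [hstep, infix_sep_iff _ hne hh q (hall q List.mem_cons_self),
        ih (fun p hp => hall p (List.mem_cons_of_mem _ hp))]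
      simp

lemma splitOn_any_infix {h : List Char} (hne : h ≠ []) (hh : ';' ∉ h) (l : List Char) :
    (∃ p ∈ List.splitOn ';' l, h <:+: p) ↔ h <:+: l := by
  conv_rhs => rw [← List.intercalate_splitOn l ';']
  exact (intercalate_infix_iff hne hh _ (fun p hp => noSemi_of_mem_splitOn hp)).symm

-- stripping whitespace does not affect containment of a whitespace-free needle
lemma dropWhile_infix_iff {h : List Char} (hne : h ≠ []) (hsp : ∀ c ∈ h, PySem.Chars.isspace c = false)
    (l : List Char) : h <:+: List.dropWhile PySem.Chars.isspace l ↔ h <:+: l := by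
  constructor
  · intro hi
    exact hi.trans (List.dropWhile_suffix _).isInfix
  · intro hi
    induction l with
    | nil => simpa using hi
    | cons a t ih =>
      by_cases ha : PySem.Chars.isspace a = true
      · rw [List.dropWhile_cons_of_pos ha]
        rcases List.infix_cons_iff.mp hi with hpre | hinf
        · cases h with
          | nil => exact absurd rfl hne
          | cons x h' =>
            rw [List.cons_prefix_cons] at hpre
            have := hsp x List.mem_cons_self
            rw [hpre.1] at this
            rw [this] at ha
            exact absurd ha (by simp)
        · exact ih hinf
      · rwa [List.dropWhile_cons_of_neg ha]

lemma strip_infix_iff {h : List Char} (hne : h ≠ []) (hsp : ∀ c ∈ h, PySem.Chars.isspace c = false)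
    (l : List Char) : h <:+: PySem.Chars.strip l ↔ h <:+: l := by
  unfold PySem.Chars.strip PySem.Chars.rstrip PySem.Chars.lstrip
  have hne' : h.reverse ≠ [] := by simpa using hne
  have hsp' : ∀ c ∈ h.reverse, PySem.Chars.isspace c = false := fun c hc => hsp c (List.mem_reverse.mp hc)
  rw [← List.reverse_infix, List.reverse_reverse, dropWhile_infix_iff hne' hsp',
    List.reverse_infix, dropWhile_infix_iff hne hsp]

lemma isIn_strip {h : List Char} (hne : h ≠ []) (hsp : ∀ c ∈ h, PySem.Chars.isspace c = false)
    (l : List Char) : PySem.Chars.isIn h (PySem.Chars.strip l) = PySem.Chars.isIn h l := by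
  rw [Bool.eq_iff_iff, PySem.Chars.isIn_iff_infix, PySem.Chars.isIn_iff_infix]
  exact strip_infix_iff hne hsp l

lemma strip_lower (l : List Char) :
    PySem.Chars.strip (PySem.Chars.lower l) = PySem.Chars.lower (PySem.Chars.strip l) := by
  have hcomp : PySem.Chars.isspace ∘ PySem.Chars.lowerChar = PySem.Chars.isspace :=
    funext isspace_lowerChar
  simp [PySem.Chars.strip, PySem.Chars.lstrip, PySem.Chars.rstrip, PySem.Chars.lower,
    ← List.map_reverse, List.dropWhile_map, hcomp]

-- tok.endswith(h) is subsumed by h in tok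
lemma endswith_or_isIn (t h : List Char) :
    (PySem.Chars.endswith t h || PySem.Chars.isIn h t) = PySem.Chars.isIn h t := by
  cases e : PySem.Chars.endswith t h with
  | false => simp
  | true =>
    have : PySem.Chars.isIn h t = true :=
      (PySem.Chars.isIn_iff_infix h t).mpr ((PySem.Chars.endswith_iff t h).mp e).isInfix
    simp [this]

lemma splitOn_any_isIn {h : List Char} (hne : h ≠ []) (hh : ';' ∉ h) (l : List Char) :
    (List.splitOn ';' l).any (fun p => PySem.Chars.isIn h p) = PySem.Chars.isIn h l := by
  rw [Bool.eq_iff_iff, List.any_eq_true]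
  simp only [PySem.Chars.isIn_iff_infix]
  exact splitOn_any_infix hne hh l

-- the key pointwise fact, per hint, on the character level
lemma key_lemma {h : List Char} (hne : h ≠ []) (hh : ';' ∉ h)
    (hsp : ∀ c ∈ h, PySem.Chars.isspace c = false) (l : List Char) :
    (List.splitOn ';' l).any (fun p =>
        PySem.Chars.endswith (PySem.Chars.lower (PySem.Chars.strip p)) h
          || PySem.Chars.isIn h (PySem.Chars.lower (PySem.Chars.strip p)))
      = PySem.Chars.isIn h (PySem.Chars.lower l) := by
  have step1 : ∀ p, (PySem.Chars.endswith (PySem.Chars.lower (PySem.Chars.strip p)) h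
      || PySem.Chars.isIn h (PySem.Chars.lower (PySem.Chars.strip p)))
      = PySem.Chars.isIn h (PySem.Chars.lower p) := by
    intro p
    rw [endswith_or_isIn, ← strip_lower, isIn_strip hne hsp]
  calc (List.splitOn ';' l).any (fun p =>
        PySem.Chars.endswith (PySem.Chars.lower (PySem.Chars.strip p)) h
          || PySem.Chars.isIn h (PySem.Chars.lower (PySem.Chars.strip p)))
      = (List.splitOn ';' l).any (fun p => PySem.Chars.isIn h (PySem.Chars.lower p)) := by
        exact PySem.List.any_congr_mem (fun p _ => step1 p)
    _ = ((List.splitOn ';' l).map (List.map PySem.Chars.lowerChar)).any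
          (fun p => PySem.Chars.isIn h p) := by
        rw [List.any_map]; rfl
    _ = (List.splitOn ';' (PySem.Chars.lower l)).any (fun p => PySem.Chars.isIn h p) := by
        rw [PySem.Chars.lower, splitOn_map_lower]
    _ = PySem.Chars.isIn h (PySem.Chars.lower l) := splitOn_any_isIn hne hh _

lemma any_any_comm {α β : Type} (l₁ : List α) (l₂ : List β) (f : α → β → Bool) :
    (l₁.any fun a => l₂.any fun b => f a b) = (l₂.any fun b => l₁.any fun a => f a b) := by
  rw [Bool.eq_iff_iff]
  simp only [List.any_eq_true]
  tauto

set_option maxRecDepth 4096 in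
lemma hint_props' : ∀ h ∈ rmdHints, (h.toList ≠ [] ∧ (';' ∉ h.toList)) ∧
    h.toList.all (fun c => !PySem.Chars.isspace c) := by decide

lemma hint_props : ∀ h ∈ rmdHints, h.toList ≠ [] ∧ (';' ∉ h.toList) ∧
    ∀ c ∈ h.toList, PySem.Chars.isspace c = false := by
  intro h hh
  obtain ⟨⟨h1, h2⟩, h3⟩ := hint_props' h hh
  refine ⟨h1, h2, ?_⟩
  simpa using h3

-- the whole body, for an arbitrary column value
lemma main_str (val : String) :
    (let pieces : List String := (PySem.Str.split? val ";").getD []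
     let toks : List String :=
       (pieces.filter (fun t => PySem.Str.strip t != "")).map
         (fun t => PySem.Str.lower (PySem.Str.strip t))
     if toks.isEmpty then false
     else toks.any (fun tok =>
       rmdHints.any (fun h => PySem.Str.endswith tok h || PySem.Str.isIn h tok)))
    = rmdHints.any (fun h => PySem.Str.isIn h (PySem.Str.lower val)) := by
  have hsemi : (";" : String).toList = [';'] := by decide
  have hpieces : (PySem.Str.split? val ";").getD []
      = (List.splitOn ';' val.toList).map String.ofList := by
    simp [PySem.Str.split?, PySem.Chars.split?, hsemi, chars_splitOn_eq]
  simp only [hpieces]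
  -- drop the `if toks.isEmpty` guard: any over [] is false anyway
  rw [show ∀ (L : List String) (F : String → Bool),
      (if L.isEmpty then false else L.any F) = L.any F by
        intro L F; cases L <;> simp]
  rw [List.any_map, List.any_filter, List.any_map]
  simp only [Function.comp_def]
  -- absorb the truthiness filter: an empty stripped token matches no hint
  have hguard : ∀ t : String,
      ((PySem.Str.strip t != "") && rmdHints.any (fun h =>
          PySem.Str.endswith (PySem.Str.lower (PySem.Str.strip t)) h
            || PySem.Str.isIn h (PySem.Str.lower (PySem.Str.strip t))))
        = rmdHints.any (fun h =>
            PySem.Str.endswith (PySem.Str.lower (PySem.Str.strip t)) h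
              || PySem.Str.isIn h (PySem.Str.lower (PySem.Str.strip t))) := by
    intro t
    by_cases he : PySem.Str.strip t = ""
    · rw [he]
      simp only [bne_self_eq_false, Bool.false_and]
      symm
      rw [List.any_eq_false]
      intro x hx
      simp only [rmdHints, List.mem_cons, List.not_mem_nil, or_false] at hx
      rcases hx with rfl | rfl | rfl | rfl | rfl <;> decide
    · simp [he]
  trans (List.splitOn ';' val.toList).any (fun cs =>
      rmdHints.any (fun h =>
        PySem.Str.endswith (PySem.Str.lower (PySem.Str.strip (String.ofList cs))) h
          || PySem.Str.isIn h (PySem.Str.lower (PySem.Str.strip (String.ofList cs)))))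
  · exact PySem.List.any_congr_mem (fun cs _ => hguard (String.ofList cs))
  trans rmdHints.any (fun h => (List.splitOn ';' val.toList).any (fun cs =>
      PySem.Str.endswith (PySem.Str.lower (PySem.Str.strip (String.ofList cs))) h
        || PySem.Str.isIn h (PySem.Str.lower (PySem.Str.strip (String.ofList cs)))))
  · exact any_any_comm _ _ _
  refine PySem.List.any_congr_mem (fun h hh => ?_)
  obtain ⟨hne, hsm, hsp⟩ := hint_props h hh
  simp only [PySem.Str.endswith_eq, PySem.Str.isIn_eq, PySem.Str.toList_lower,
    PySem.Str.toList_strip, String.toList_ofList]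
  exact key_lemma hne hsm hsp val.toList

-- ===== VERDICT (by name: the statement is the Claim_ definition above) =====
theorem infer_rmd_touch_spec : Claim_equal_infer_rmd_touch := by
  intro row col_files _dom hpre
  unfold Spec_infer_rmd_touch infer_rmd_touch infer_rmd_touch_alt
  cases col_files with
  | none => rfl
  | some k =>
    unfold Pre_infer_rmd_touch at hpre
    simp only [Option.all_some] at hpre
    rw [PySem.Dict.contains_eq_isSome_get?] at hpre
    cases e : PySem.Dict.get? (PySem.Dict.mk row) k with
    | none => rw [e] at hpre; simp at hpre
    | some raw =>
      simp only [e]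
      exact main_str (if raw == "" then "" else raw)
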